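-- pv_equiv track=rewrite | github.com/MikeMNelhams/Advent-of-Code | solutions/2025/day6/day6_1.py | __cephalopod_number_grid_from_lines
-- ===== SOURCE A (Python) =====
-- from functools import reduce
--
-- def __cephalopod_number_grid_from_lines(lines: list[str]) -> list[list[int]]:
--     max_line_length = reduce(max, (len(line) for line in lines[:-1]), -1)
--     for i in range(len(lines[:-1])):
--         lines[i] = lines[i].ljust(max_line_length)
--
--     column_indices = [i - 1 for i, char in enumerate(lines[-1]) if char != " "]
--     column_indices = [0] + column_indices[1:] + [max_line_length]
--
--     n = len(lines) - 1
--     number_grid = []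
--     for column_index_index in range(1, len(column_indices)):
--         m = column_indices[column_index_index] - column_indices[column_index_index - 1]
--         column_index = column_indices[column_index_index]
--         numbers = []
--         for j in range(1, m + 1):
--             digits = "".join(lines[i][column_index - j] for i in range(n)).strip()
--             if digits != "":
--                 numbers.append(int(digits))
--         number_grid.append(numbers)
--     return number_grid
-- ===== SOURCE B (Python) =====
-- def __cephalopod_number_grid_from_lines(lines: list[str]) -> list[list[int]]:
--     # One row-major pass accumulates every column buffer at once; columns are
--     # then parsed ONCE into a global table of Optional ints, and each segment
--     # of the grid is a mere slice of that table (reversed, Nones dropped).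
--     body = lines[:-1]
--     width = max((len(line) for line in body), default=-1)
--     for i in range(len(body)):
--         lines[i] = lines[i].ljust(width)
--     bufs = [""] * width
--     for i in range(len(body)):
--         bufs = [b + c for b, c in zip(bufs, lines[i])]
--     vals = []
--     for b in bufs:
--         s = b.strip()
--         vals.append(int(s) if s else None)
--     marks = [i - 1 for i, ch in enumerate(lines[-1]) if ch != " "]
--     bounds = [0] + marks[1:] + [width]
--     return [[v for v in reversed(vals[lo:hi]) if v is not None]
--             for lo, hi in zip(bounds, bounds[1:])]
-- ===== Notes on version B (the rewrite author's own statement) =====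
-- stated objective: alternative
-- what changed: A recomputes every column string inside the segment loop with index arithmetic (per segment, per offset j, a join over row indices of lines[i][column_index-j]); B never touches characters per segment: one row-major fold accumulates all column buffers simultaneously (accumulator list updated per row), parses each column once into a global table of Optional ints, and each grid segment is just a reversed slice of that table with Nones dropped; both pad lines[:-1] in place identically (same mutation).
import Mathlib
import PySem

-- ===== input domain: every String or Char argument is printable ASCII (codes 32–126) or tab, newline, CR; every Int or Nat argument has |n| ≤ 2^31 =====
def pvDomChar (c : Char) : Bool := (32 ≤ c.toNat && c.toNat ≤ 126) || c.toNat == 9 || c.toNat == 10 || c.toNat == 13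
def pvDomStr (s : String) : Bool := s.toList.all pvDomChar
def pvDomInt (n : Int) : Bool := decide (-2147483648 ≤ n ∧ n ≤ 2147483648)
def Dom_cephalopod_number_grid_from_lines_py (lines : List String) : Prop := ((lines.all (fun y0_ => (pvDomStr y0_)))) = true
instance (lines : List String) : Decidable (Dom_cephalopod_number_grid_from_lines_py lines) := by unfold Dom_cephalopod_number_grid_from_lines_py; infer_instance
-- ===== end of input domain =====

-- B replaces A's per-segment recomputation of column strings (index arithmetic
-- lines[i][column_index-j] inside the segment loop) by one row-major fold that
-- accumulates all column buffers at once, a global table of Optional parsed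
-- column values, and per-segment slices of that table; both pad lines[:-1] in
-- place identically (the theorems are about the return value).


-- ===== PORT A =====
-- s.ljust(w): pad on the right with spaces to width w (exact: unchanged when w ≤ len(s))
def pvLjust (cs : List Char) (w : Int) : List Char :=
  cs ++ List.replicate (w - (cs.length : Int)).toNat ' '

def cephalopod_number_grid_from_lines_py (lines : List String) : List (List Int) :=
  let rows0 := lines.dropLast.map String.toList
  let maxLineLength : Int := rows0.foldl (fun acc l => max acc ((l.length : Int))) (-1)
  let rows := rows0.map (fun l => pvLjust l maxLineLength)
  let lastL := (lines.getLast?.getD "").toList      -- lines[-1]; Pre_ excludes lines = [] (IndexError)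
  let ci0 : List Int := ((PySem.List.enumerate lastL 0).filter (fun p => p.2 != ' ')).map (fun p => p.1 - 1)
  let ci : List Int := 0 :: (ci0.drop 1 ++ [maxLineLength])
  let n : Int := (lines.length : Int) - 1
  (PySem.List.pyRange 1 (ci.length : Int) 1).foldl (fun grid k =>
    let m := PySem.List.pyGetD ci k 0 - PySem.List.pyGetD ci (k - 1) 0
    let c := PySem.List.pyGetD ci k 0
    let numbers := (PySem.List.pyRange 1 (m + 1) 1).foldl (fun nums j =>
      let digits := PySem.Chars.strip
        ((PySem.List.pyRange 0 n 1).foldl (fun acc i =>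
          acc ++ [PySem.List.pyGetD (PySem.List.pyGetD rows i []) (c - j) ' ']) [])
      if digits != ([] : List Char) then nums ++ [(PySem.Int.ofChars? digits).getD 0] else nums) []
    grid ++ [numbers]) []

-- ===== PORT B =====
def cephalopod_number_grid_from_lines_py_alt (lines : List String) : List (List Int) :=
  let rows0 := lines.dropLast.map String.toList
  let width : Int := rows0.foldl (fun acc l => max acc ((l.length : Int))) (-1)
  let rows := rows0.map (fun l => pvLjust l width)
  -- bufs = [""] * width;  for each padded row:  bufs = [b + c for b, c in zip(bufs, row)]
  let bufs := rows.foldl (fun bufs row => (bufs.zip row).map (fun q => q.1 ++ [q.2]))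
                (List.replicate width.toNat ([] : List Char))
  let vals : List (Option Int) := bufs.map (fun b =>
    let s := PySem.Chars.strip b
    if s != ([] : List Char) then some ((PySem.Int.ofChars? s).getD 0) else none)
  let lastL := (lines.getLast?.getD "").toList      -- lines[-1]; Pre_ excludes lines = []
  let marks : List Int := ((PySem.List.enumerate lastL 0).filter (fun p => p.2 != ' ')).map (fun p => p.1 - 1)
  let bounds : List Int := 0 :: (marks.drop 1 ++ [width])
  (bounds.zip (bounds.drop 1)).map (fun lh =>
    ((PySem.List.slice vals (some lh.1) (some lh.2)).reverse).filterMap id)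

-- ===== PRECONDITION & SPEC =====
-- Pre_ = exactly the inputs on which A returns: lines nonempty (else lines[-1] raises IndexError);
-- and, when there is at least one data row, every last-line column marker except the first lies
-- within the padded width (else lines[i][...] raises IndexError) and every column, read top to
-- bottom and stripped, is empty or an int literal (else int(...) raises ValueError).
def Pre_cephalopod_number_grid_from_lines_py (lines : List String) : Prop :=
  lines ≠ [] ∧
  ((lines.dropLast.map String.toList) = [] ∨
   (((((PySem.List.enumerate ((lines.getLast?.getD "").toList) 0).filter (fun p => p.2 != ' ')).map
        (fun p => p.1 - 1)).drop 1).all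
      (fun x => decide (x ≤ (lines.dropLast.map String.toList).foldl
        (fun acc l => max acc ((l.length : Int))) (-1))) = true ∧
    ∀ p ∈ List.range ((lines.dropLast.map String.toList).foldl
        (fun acc l => max acc ((l.length : Int))) (-1)).toNat,
      PySem.Chars.strip ((lines.dropLast.map String.toList).map (fun r => r.getD p ' ')) = [] ∨
      (PySem.Int.ofChars? (PySem.Chars.strip
        ((lines.dropLast.map String.toList).map (fun r => r.getD p ' ')))).isSome = true))
instance (lines : List String) : Decidable (Pre_cephalopod_number_grid_from_lines_py lines) := by
  unfold Pre_cephalopod_number_grid_from_lines_py; infer_instance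

def pvWitness_cephalopod_number_grid_from_lines_py : List String := ["12", " 3", " *"]

def Spec_cephalopod_number_grid_from_lines_py (lines : List String) (out : List (List Int)) : Prop := out = cephalopod_number_grid_from_lines_py_alt lines
instance (lines : List String) (out : List (List Int)) : Decidable (Spec_cephalopod_number_grid_from_lines_py lines out) := by unfold Spec_cephalopod_number_grid_from_lines_py; infer_instance

-- ===== CLAIM (what is proved, stated in full; the proofs are below) =====
def Claim_equal_cephalopod_number_grid_from_lines_py : Prop := ∀ (lines : List String), Dom_cephalopod_number_grid_from_lines_py lines → Pre_cephalopod_number_grid_from_lines_py lines → Spec_cephalopod_number_grid_from_lines_py lines (cephalopod_number_grid_from_lines_py lines)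

-- ===== LEMMAS AND PROOFS =====

-- the parsed value of column p (top-to-bottom characters, stripped), as B's table stores it
def pvColVal (R : List (List Char)) (p : Nat) : Option Int :=
  let s := PySem.Chars.strip (R.map (fun r => r.getD p ' '))
  if s != ([] : List Char) then some ((PySem.Int.ofChars? s).getD 0) else none

lemma pv_outer {α : Type} (F : Int → Int → α) (ci : List Int) :
    (PySem.List.pyRange 1 (ci.length : Int) 1).foldl
      (fun acc k => acc ++ [F (PySem.List.pyGetD ci (k - 1) 0) (PySem.List.pyGetD ci k 0)]) []
    = (ci.zip (ci.drop 1)).map (fun p => F p.1 p.2) := by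
  rw [PySem.List.foldl_append_singleton_eq_map]
  simp only [List.nil_append]
  apply List.ext_getElem
  · simp only [List.length_map, PySem.List.length_pyRange_one, List.length_zip, List.length_drop]
    omega
  · intro t h1 h2
    have hlt : t + 1 < ci.length := by
      simp [PySem.List.length_pyRange_one] at h1; omega
    simp only [List.getElem_map, PySem.List.getElem_pyRange_one, List.getElem_zip]
    have e1 : (1 : Int) + (t : Int) - 1 = ((t : Nat) : Int) := by omega
    have e2 : (1 : Int) + (t : Int) = (((t + 1 : Nat)) : Int) := by omega
    rw [e1, e2, PySem.List.pyGetD_natCast, PySem.List.pyGetD_natCast]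
    have g1 : ci.getD t 0 = ci[t]'(by omega) := List.getD_eq_getElem _ _ _
    have g2 : ci.getD (t + 1) 0 = ci[t + 1]'hlt := List.getD_eq_getElem _ _ _
    rw [g1, g2]
    congr 1
    rw [List.getElem_drop]
    congr 1
    omega

lemma pv_colA (R : List (List Char)) (p : Int) :
    (PySem.List.pyRange 0 (R.length : Int) 1).foldl
      (fun acc i => acc ++ [PySem.List.pyGetD (PySem.List.pyGetD R i []) p ' ']) []
    = R.map (fun r => PySem.List.pyGetD r p ' ') := by
  rw [PySem.List.foldl_append_singleton_eq_map]
  simp only [List.nil_append]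
  rw [show (fun i => PySem.List.pyGetD (PySem.List.pyGetD R i []) p ' ')
      = (fun r => PySem.List.pyGetD r p ' ') ∘ (fun i => PySem.List.pyGetD R i ([] : List Char)) from rfl]
  rw [← List.map_map, PySem.List.map_pyGetD_pyRange_zero']

-- the row-major buffer fold computes exactly the column strings
lemma pv_bufs (rows : List (List Char)) (Wn : Nat) (h : ∀ r ∈ rows, r.length = Wn) :
    ∀ acc : List (List Char), acc.length = Wn →
    rows.foldl (fun bufs row => (bufs.zip row).map (fun q => q.1 ++ [q.2])) acc
      = (List.range Wn).map (fun p => acc.getD p [] ++ rows.map (fun r => r.getD p ' ')) := by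
  induction rows with
  | nil =>
      intro acc hacc
      simp only [List.foldl_nil, List.map_nil, List.append_nil]
      apply List.ext_getElem
      · simp [hacc]
      · intro t h1 h2
        simp only [List.getElem_map, List.getElem_range]
        exact (List.getD_eq_getElem acc [] (by omega)).symm
  | cons r rows ih =>
      intro acc hacc
      have hr : r.length = Wn := h r List.mem_cons_self
      have hstep : ((acc.zip r).map (fun q => q.1 ++ [q.2])).length = Wn := by
        simp [List.length_zip, hacc, hr]
      rw [List.foldl_cons, ih (fun l hl => h l (List.mem_cons_of_mem _ hl)) _ hstep]
      apply List.map_congr_left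
      intro p hp
      have hpW : p < Wn := List.mem_range.mp hp
      have h1 : ((acc.zip r).map (fun q => q.1 ++ [q.2])).getD p []
          = acc.getD p [] ++ [r.getD p ' '] := by
        have hlt : p < ((acc.zip r).map (fun q => q.1 ++ [q.2])).length := by omega
        rw [List.getD_eq_getElem _ _ hlt]
        simp only [List.getElem_map, List.getElem_zip]
        rw [List.getD_eq_getElem acc [] (by omega), List.getD_eq_getElem r ' ' (by omega)]
      rw [h1, List.map_cons, List.append_assoc]
      rfl

lemma pv_filterMap_if {α β : Type} (l : List α) (c : α → Bool) (v : α → β) :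
    (l.filterMap (fun x => if c x then some (v x) else none)) = (l.filter c).map v := by
  induction l with
  | nil => rfl
  | cons x t ih =>
      by_cases hx : c x
      · simp [hx, ih]
      · simp [hx, ih]

-- main per-segment equality: A's inner fold = B's reversed table slice, filtered
lemma pv_inner (R : List (List Char)) (W lo hi nInt : Int)
    (hR : R ≠ [])
    (hn : nInt = (R.length : Int))
    (hlen : ∀ r ∈ R, (r.length : Int) = W)
    (hlo : 0 ≤ lo) (hhi0 : 0 ≤ hi) (hhi : hi ≤ W) :
    (PySem.List.pyRange 1 (hi - lo + 1) 1).foldl (fun nums j =>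
      if PySem.Chars.strip
          ((PySem.List.pyRange 0 nInt 1).foldl (fun acc i =>
            acc ++ [PySem.List.pyGetD (PySem.List.pyGetD R i []) (hi - j) ' ']) []) != ([] : List Char)
      then nums ++ [(PySem.Int.ofChars? (PySem.Chars.strip
          ((PySem.List.pyRange 0 nInt 1).foldl (fun acc i =>
            acc ++ [PySem.List.pyGetD (PySem.List.pyGetD R i []) (hi - j) ' ']) []))).getD 0]
      else nums) []
    = ((PySem.List.slice ((List.range W.toNat).map (pvColVal R)) (some lo) (some hi)).reverse).filterMap id := by
  subst hn
  have hW0 : 0 ≤ W := by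
    obtain ⟨r, hr⟩ := List.exists_mem_of_ne_nil R hR
    have := hlen r hr; omega
  obtain ⟨a, rfl⟩ : ∃ a : Nat, lo = (a : Int) := ⟨lo.toNat, by omega⟩
  obtain ⟨b, rfl⟩ : ∃ b : Nat, hi = (b : Int) := ⟨hi.toNat, by omega⟩
  obtain ⟨Wn, hWn⟩ : ∃ w : Nat, W = (w : Int) := ⟨W.toNat, by omega⟩
  have hWt : W.toNat = Wn := by omega
  have hbW : b ≤ Wn := by rw [hWn] at hhi; exact_mod_cast hhi
  have hlenN : ∀ r ∈ R, r.length = Wn := by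
    intro r hr; have := hlen r hr; rw [hWn] at this; exact_mod_cast this
  -- B side: the slice of the table is the columns a..b-1
  have hslice : PySem.List.slice ((List.range W.toNat).map (pvColVal R)) (some (a : Int)) (some (b : Int))
      = (List.range' a (b - a)).map (pvColVal R) := by
    rw [PySem.List.slice_natCast]
    apply List.ext_getElem
    · simp only [List.length_take, List.length_drop, List.length_map, List.length_range,
        List.length_range', hWt]
      omega
    · intro t h1 h2
      have ht : t < b - a := by simpa using h2
      have hta : a + t < Wn := by omega
      simp only [List.getElem_take, List.getElem_drop, List.getElem_map, List.getElem_range,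
        List.getElem_range', hWt, one_mul]
  rw [hslice]
  by_cases hord : b ≤ a
  · have h1 : PySem.List.pyRange 1 ((b : Int) - (a : Int) + 1) 1 = [] :=
      PySem.List.pyRange_one_eq_nil (by omega)
    have h2 : b - a = 0 := by omega
    rw [h1, h2]
    simp
  · have hab : a < b := by omega
    have hcol : ∀ j : Int, (PySem.List.pyRange 0 ((R.length : Int)) 1).foldl (fun acc i =>
        acc ++ [PySem.List.pyGetD (PySem.List.pyGetD R i []) ((b : Int) - j) ' ']) []
        = R.map (fun r => PySem.List.pyGetD r ((b : Int) - j) ' ') := fun j => pv_colA R _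
    simp only [hcol]
    rw [PySem.List.foldl_append_if
      (fun j => PySem.Chars.strip (R.map (fun r => PySem.List.pyGetD r ((b : Int) - j) ' ')) != [])
      (fun j => (PySem.Int.ofChars? (PySem.Chars.strip (R.map (fun r => PySem.List.pyGetD r ((b : Int) - j) ' ')))).getD 0)]
    simp only [List.nil_append]
    -- B side: reverse of map, filterMap of the if-option = filter+map
    have hB : (((List.range' a (b - a)).map (pvColVal R)).reverse).filterMap id
        = (((List.range' a (b - a)).reverse.map (fun p => R.map (fun r => r.getD p ' '))).filter
            (fun s => PySem.Chars.strip s != [])).map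
            (fun s => (PySem.Int.ofChars? (PySem.Chars.strip s)).getD 0) := by
      rw [← List.map_reverse, List.filterMap_map]
      have : (id ∘ pvColVal R) = (fun p => if (fun s => PySem.Chars.strip s != []) (R.map (fun r => r.getD p ' '))
          then some ((fun s => (PySem.Int.ofChars? (PySem.Chars.strip s)).getD 0) (R.map (fun r => r.getD p ' ')))
          else none) := by
        funext p
        simp only [Function.comp_apply, pvColVal, id]
      rw [this]
      rw [show (fun p => if (fun s => PySem.Chars.strip s != []) (R.map fun r => r.getD p ' ')
            then some ((fun s => (PySem.Int.ofChars? (PySem.Chars.strip s)).getD 0) (R.map fun r => r.getD p ' '))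
            else none)
          = (fun x => if (fun s => PySem.Chars.strip s != ([] : List Char)) x
            then some ((fun s => (PySem.Int.ofChars? (PySem.Chars.strip s)).getD 0) x) else none)
            ∘ (fun p => R.map fun r => r.getD p ' ') from rfl]
      rw [← List.filterMap_map, pv_filterMap_if]
    rw [hB]
    -- the two column lists coincide (A reads right-to-left by int index, B reverses the table)
    have hkey : (PySem.List.pyRange 1 ((b : Int) - (a : Int) + 1) 1).map
          (fun j => R.map (fun r => PySem.List.pyGetD r ((b : Int) - j) ' '))
        = (List.range' a (b - a)).reverse.map (fun p => R.map (fun r => r.getD p ' ')) := by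
      apply List.ext_getElem
      · simp only [List.length_map, PySem.List.length_pyRange_one, List.length_reverse,
          List.length_range']
        omega
      · intro t h1 h2
        have ht : t < b - a := by
          simp only [List.length_map, PySem.List.length_pyRange_one] at h1
          omega
        simp only [List.getElem_map, PySem.List.getElem_pyRange_one, List.getElem_reverse,
          List.length_range', List.getElem_range']
        apply List.map_congr_left
        intro r hr
        have hrl : r.length = Wn := hlenN r hr
        have hidx : (0 : Int) ≤ (b : Int) - (1 + (t : Int)) := by omega
        have hidx2 : (b : Int) - (1 + (t : Int)) < (r.length : Int) := by rw [hrl]; omega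
        rw [PySem.List.pyGetD_eq_getElem r ' ' hidx hidx2]
        rw [List.getD_eq_getElem r ' ' (by omega : a + 1 * (b - a - 1 - t) < r.length)]
        congr 1
        omega
    rw [← hkey, List.filter_map, List.map_map]
    rfl

-- degenerate case: no data rows at all (every segment is empty on both sides)
lemma pv_inner_nil (lo hi nInt : Int) (hn : nInt ≤ 0) :
    (PySem.List.pyRange 1 (hi - lo + 1) 1).foldl (fun nums j =>
      if PySem.Chars.strip
          ((PySem.List.pyRange 0 nInt 1).foldl (fun acc i =>
            acc ++ [PySem.List.pyGetD (PySem.List.pyGetD ([] : List (List Char)) i []) (hi - j) ' ']) []) != ([] : List Char)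
      then nums ++ [(PySem.Int.ofChars? (PySem.Chars.strip
          ((PySem.List.pyRange 0 nInt 1).foldl (fun acc i =>
            acc ++ [PySem.List.pyGetD (PySem.List.pyGetD ([] : List (List Char)) i []) (hi - j) ' ']) []))).getD 0]
      else nums) []
    = ((PySem.List.slice ([] : List (Option Int)) (some lo) (some hi)).reverse).filterMap id := by
  have h0 : PySem.List.pyRange 0 nInt 1 = [] := PySem.List.pyRange_one_eq_nil hn
  have hs0 : PySem.Chars.strip ([] : List Char) = [] := rfl
  simp only [h0, List.foldl_nil, hs0, bne_self_eq_false, Bool.false_eq_true, if_false]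
  have hsl : PySem.List.slice ([] : List (Option Int)) (some lo) (some hi) = [] := by
    simp [PySem.List.slice]
  simp [hsl]

lemma pv_marks_pairwise (lastL : List Char) :
    (((PySem.List.enumerate lastL 0).filter (fun p => p.2 != ' ')).map (fun p => p.1 - 1)).Pairwise (· < ·) :=
  ((PySem.List.pairwise_lt_enumerate lastL 0).filter _).map _ (fun _ _ h => by omega)

lemma pv_marks_ge (lastL : List Char) :
    ∀ x ∈ ((PySem.List.enumerate lastL 0).filter (fun p => p.2 != ' ')).map (fun p => p.1 - 1), -1 ≤ x := by
  intro x hx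
  obtain ⟨p, hp, rfl⟩ := List.mem_map.mp hx
  obtain ⟨k, hk, rfl⟩ := (PySem.List.mem_enumerate_iff _ _ _).mp (List.mem_of_mem_filter hp)
  simp
  omega

lemma pv_ci_mem (marks : List Int) (W : Int) (hW : 0 ≤ W)
    (hpw : marks.Pairwise (· < ·)) (hge : ∀ x ∈ marks, -1 ≤ x)
    (hub : ∀ x ∈ marks.drop 1, x ≤ W) :
    ∀ x ∈ (0 : Int) :: (marks.drop 1 ++ [W]), 0 ≤ x ∧ x ≤ W := by
  intro x hx
  rcases List.mem_cons.mp hx with rfl | hx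
  · exact ⟨le_rfl, hW⟩
  rcases List.mem_append.mp hx with hx | hx
  · refine ⟨?_, hub x hx⟩
    rcases marks with _ | ⟨m0, rest⟩
    · simp at hx
    · simp only [List.drop_succ_cons, List.drop_zero] at hx
      have h1 : m0 < x := (List.pairwise_cons.mp hpw).1 x hx
      have h2 : -1 ≤ m0 := hge m0 List.mem_cons_self
      omega
  · simp only [List.mem_singleton] at hx
    subst hx
    exact ⟨hW, le_rfl⟩

-- ===== VERDICT (by name: the statement is the Claim_ definition above) =====
theorem cephalopod_number_grid_from_lines_py_spec : Claim_equal_cephalopod_number_grid_from_lines_py := by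
  intro lines _ hpre
  obtain ⟨hne, hrest⟩ := hpre
  unfold Spec_cephalopod_number_grid_from_lines_py
  unfold cephalopod_number_grid_from_lines_py cephalopod_number_grid_from_lines_py_alt
  simp only []
  set rows0 := lines.dropLast.map String.toList with hrows0
  set W : Int := rows0.foldl (fun acc l => max acc ((l.length : Int))) (-1) with hWdef
  set R := rows0.map (fun l => pvLjust l W) with hRdef
  set lastL := (lines.getLast?.getD "").toList with hlastL
  set marks : List Int := ((PySem.List.enumerate lastL 0).filter (fun p => p.2 != ' ')).map (fun p => p.1 - 1) with hmarksdef
  set ci : List Int := (0 : Int) :: (marks.drop 1 ++ [W]) with hcidef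
  have hnlen : (lines.length : Int) - 1 = (R.length : Int) := by
    have h1 : R.length = rows0.length := by rw [hRdef, List.length_map]
    have h2 : rows0.length = lines.length - 1 := by rw [hrows0, List.length_map, List.length_dropLast]
    have h3 : 1 ≤ lines.length := List.length_pos_of_ne_nil hne
    rw [h1, h2]
    omega
  by_cases hrows : rows0 = []
  · -- no data rows: bufs = vals = [] and every segment is empty on both sides
    have hRnil : R = [] := by rw [hRdef, hrows]; rfl
    have hWneg : W = -1 := by rw [hWdef, hrows]; rfl
    rw [hRnil, hWneg]
    simp only [List.foldl_nil]
    have hrep : List.replicate ((-1 : Int)).toNat ([] : List Char) = [] := rfl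
    rw [hrep]
    simp only [List.map_nil]
    refine Eq.trans (pv_outer (fun prev c =>
      (PySem.List.pyRange 1 (c - prev + 1) 1).foldl (fun nums j =>
        if PySem.Chars.strip
            ((PySem.List.pyRange 0 ((lines.length : Int) - 1) 1).foldl (fun acc i =>
              acc ++ [PySem.List.pyGetD (PySem.List.pyGetD ([] : List (List Char)) i []) (c - j) ' ']) []) != ([] : List Char)
        then nums ++ [(PySem.Int.ofChars? (PySem.Chars.strip
            ((PySem.List.pyRange 0 ((lines.length : Int) - 1) 1).foldl (fun acc i =>
              acc ++ [PySem.List.pyGetD (PySem.List.pyGetD ([] : List (List Char)) i []) (c - j) ' ']) []))).getD 0]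
        else nums) []) ci) ?_
    apply List.map_congr_left
    rintro ⟨lo, hi⟩ _
    have hn0 : (lines.length : Int) - 1 ≤ 0 := by
      rw [hnlen, hRnil]; simp
    simpa using pv_inner_nil lo hi _ hn0
  · -- at least one data row
    obtain ⟨hmarks, _⟩ := hrest.resolve_left hrows
    have hfold : W = (rows0.map (fun l => (l.length : Int))).foldl max (-1) := by
      rw [hWdef, List.foldl_map]
      rw [hrows0, List.map_map, List.foldl_map]
      rfl
    have hlenW : ∀ l ∈ rows0, (l.length : Int) ≤ W := by
      intro l hl
      have := (PySem.List.le_foldl_max (rows0.map (fun l => (l.length : Int))) (-1)).2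
        ((l.length : Int)) (List.mem_map_of_mem hl)
      rw [← hfold] at this
      exact this
    have hW0 : 0 ≤ W := by
      obtain ⟨l, hl⟩ := List.exists_mem_of_ne_nil rows0 hrows
      have := hlenW l hl
      omega
    have hlen : ∀ r ∈ R, (r.length : Int) = W := by
      intro r hr
      rw [hRdef] at hr
      obtain ⟨l, hl, rfl⟩ := List.mem_map.mp hr
      have h1 := hlenW l hl
      have h2 : (pvLjust l W).length = l.length + (W - (l.length : Int)).toNat := by
        simp [pvLjust]
      rw [h2]
      omega
    have hRne : R ≠ [] := by
      rw [hRdef]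
      simpa using hrows
    have hlenN : ∀ r ∈ R, r.length = W.toNat := by
      intro r hr
      have := hlen r hr
      omega
    -- B's buffer fold computes the column strings, hence vals is the column table
    have hbufs : R.foldl (fun bufs row => (bufs.zip row).map (fun q => q.1 ++ [q.2]))
        (List.replicate W.toNat ([] : List Char))
        = (List.range W.toNat).map (fun p => R.map (fun r => r.getD p ' ')) := by
      rw [pv_bufs R W.toNat hlenN _ (by simp)]
      apply List.map_congr_left
      intro p _
      simp only [List.getD, List.getElem?_replicate]
      split_ifs <;> rfl
    rw [hbufs, List.map_map]
    have hvals : ((fun b : List Char =>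
        let s := PySem.Chars.strip b
        if s != ([] : List Char) then some ((PySem.Int.ofChars? s).getD 0) else none)
          ∘ fun p => R.map (fun r => r.getD p ' ')) = pvColVal R := by
      funext p
      rfl
    rw [hvals]
    have hub : ∀ x ∈ marks.drop 1, x ≤ W := by
      intro x hx
      exact of_decide_eq_true (List.all_eq_true.mp hmarks x hx)
    have hbounds := pv_ci_mem marks W hW0 (pv_marks_pairwise lastL) (pv_marks_ge lastL) hub
    rw [← hcidef] at hbounds
    refine Eq.trans (pv_outer (fun prev c =>
      (PySem.List.pyRange 1 (c - prev + 1) 1).foldl (fun nums j =>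
        if PySem.Chars.strip
            ((PySem.List.pyRange 0 ((lines.length : Int) - 1) 1).foldl (fun acc i =>
              acc ++ [PySem.List.pyGetD (PySem.List.pyGetD R i []) (c - j) ' ']) []) != ([] : List Char)
        then nums ++ [(PySem.Int.ofChars? (PySem.Chars.strip
            ((PySem.List.pyRange 0 ((lines.length : Int) - 1) 1).foldl (fun acc i =>
              acc ++ [PySem.List.pyGetD (PySem.List.pyGetD R i []) (c - j) ' ']) []))).getD 0]
        else nums) []) ci) ?_
    apply List.map_congr_left
    rintro ⟨lo, hi⟩ hp
    obtain ⟨hlo_mem, hhi_mem⟩ := List.of_mem_zip hp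
    have hlo := (hbounds lo hlo_mem).1
    have hhi := hbounds hi (List.mem_of_mem_drop hhi_mem)
    exact pv_inner R W lo hi ((lines.length : Int) - 1) hRne hnlen hlen hlo hhi.1 hhi.2
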